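-- pv_equiv track=rewrite | github.com/JackieMaw/AdventOfCode | python/2021/2021day23a.py | get_all_settled
-- ===== SOURCE A (Python) =====
-- final_state = [[(3, 2), (3, 3)], [(5, 2), (5, 3)], [(7, 2), (7, 3)], [(9, 2), (9, 3)]]
--
-- def is_foreigner_present(state, team_number, team_room_spaces, player):
--
--     team_players = state[team_number]
--
--     (player_x, player_y) = player
--     for team_room_space in team_room_spaces:
--         (x, y) = team_room_space
--         # deeper in the room than the player
--         if y > player_y:
--             # this space should be occupied by someone in my team
--             if team_room_space not in team_players:
--                 return True
--
--     return False
--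
-- def is_settled(player, team_number, state):
--
--     # to be settled, the player should be in the team room, and there should be no other foreign players deeper in the room
--     team_room_spaces = final_state[team_number]
--     if player in team_room_spaces:
--         if is_foreigner_present(state, team_number, team_room_spaces, player):
--             return False
--         else:
--             return True
--
--     return False
--
-- def get_all_settled(state):
--
--     settled = []
--
--     for team_number in range(4):
--         team_state = state[team_number]
--         for player in team_state:
--             if is_settled(player, team_number, state):
--                 settled.append(player)
--
--     return settled
-- ===== SOURCE B (Python) =====
-- final_state = [[(3, 2), (3, 3)], [(5, 2), (5, 3)], [(7, 2), (7, 3)], [(9, 2), (9, 3)]]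
--
-- def get_all_settled(state):
--     settled = []
--     for team_number in range(4):
--         team_state = state[team_number]
--         occupied = set(team_state)
--         # phase 1: settled room positions, deepest-first, while the suffix below stays team-filled
--         settled_positions = set()
--         still_filled = True
--         for space in sorted(final_state[team_number], key=lambda s: s[1], reverse=True):
--             if still_filled:
--                 settled_positions.add(space)
--             if space not in occupied:
--                 still_filled = False
--         # phase 2: keep players (original stored order) sitting on a settled position
--         for player in team_state:
--             if player in settled_positions:
--                 settled.append(player)
--     return settled
-- ===== Notes on version B (the rewrite author's own statement) =====
-- stated objective: alternative
-- what changed: Per team, B first builds the set of settled room positions in one deepest-first walk (a still_filled flag over the sorted room spaces) and then filters the team's players in stored order against that set, instead of A's per-player is_settled call that re-scans the room and the team list for deeper foreigners.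
import Mathlib
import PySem

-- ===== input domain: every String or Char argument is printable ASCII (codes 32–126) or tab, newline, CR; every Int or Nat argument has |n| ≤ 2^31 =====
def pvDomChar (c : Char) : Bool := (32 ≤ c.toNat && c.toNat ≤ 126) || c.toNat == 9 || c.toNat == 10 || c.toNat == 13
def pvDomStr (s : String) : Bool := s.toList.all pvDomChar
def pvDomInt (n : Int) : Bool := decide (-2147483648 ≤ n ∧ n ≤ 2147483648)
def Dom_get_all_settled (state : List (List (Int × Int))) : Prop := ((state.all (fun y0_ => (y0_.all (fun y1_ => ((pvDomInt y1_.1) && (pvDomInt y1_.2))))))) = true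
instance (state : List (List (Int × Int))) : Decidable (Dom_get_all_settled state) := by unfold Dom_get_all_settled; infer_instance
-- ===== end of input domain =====

-- B replaces A's per-player inner re-scan of the room by a two-phase pass per team:
-- first build the set of settled room positions (deepest-first walk), then filter the team's
-- players in stored order against that set (objective: alternative decomposition, same cost).

-- ===== PORT A =====
def pvFinalState : List (List (Int × Int)) :=
  [[(3, 2), (3, 3)], [(5, 2), (5, 3)], [(7, 2), (7, 3)], [(9, 2), (9, 3)]]

def is_foreigner_present (state : List (List (Int × Int))) (team_number : Int)
    (team_room_spaces : List (Int × Int)) (player : Int × Int) : Bool :=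
  let team_players := (PySem.List.pyGet? state team_number).getD []
  -- 'for … if …: return True / return False' is List.any
  team_room_spaces.any (fun s => decide (s.2 > player.2) && !(team_players.contains s))

def is_settled (player : Int × Int) (team_number : Int)
    (state : List (List (Int × Int))) : Bool :=
  let team_room_spaces := (PySem.List.pyGet? pvFinalState team_number).getD []
  if team_room_spaces.contains player then
    if is_foreigner_present state team_number team_room_spaces player then false else true
  else false

def get_all_settled (state : List (List (Int × Int))) : List (Int × Int) :=
  (PySem.List.pyRange 0 4 1).foldl (fun settled team_number =>
    let team_state := (PySem.List.pyGet? state team_number).getD []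
    team_state.foldl (fun acc player =>
      if is_settled player team_number state then acc ++ [player] else acc) settled) []

-- ===== PORT B =====
-- phase 1 of Source B: walk the room deepest-first, collecting positions while the suffix stays filled
def settledPositions (spaces : List (Int × Int)) (occupied : PySem.Set (Int × Int)) :
    PySem.Set (Int × Int) :=
  ((PySem.List.sorted spaces (fun s => s.2) true).foldl
    (fun (p : PySem.Set (Int × Int) × Bool) space =>
      ((if p.2 then PySem.Set.add p.1 space else p.1),
       p.2 && PySem.Set.contains occupied space))
    (PySem.Set.empty, true)).1

def get_all_settled_alt (state : List (List (Int × Int))) : List (Int × Int) :=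
  (PySem.List.pyRange 0 4 1).foldl (fun settled team_number =>
    let team_state := (PySem.List.pyGet? state team_number).getD []
    let pos := settledPositions ((PySem.List.pyGet? pvFinalState team_number).getD [])
                 (PySem.Set.ofList team_state)
    -- phase 2: keep players (original stored order) sitting on a settled position
    team_state.foldl (fun acc player =>
      if PySem.Set.contains pos player then acc ++ [player] else acc) settled) []

-- ===== PRECONDITION & SPEC =====
-- Pre_ excludes states with fewer than 4 team lists, on which Python A raises IndexError.
def Pre_get_all_settled (state : List (List (Int × Int))) : Prop := 4 ≤ state.length
instance (state : List (List (Int × Int))) : Decidable (Pre_get_all_settled state) := by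
  unfold Pre_get_all_settled; infer_instance

def pvWitness_get_all_settled : (List (List (Int × Int))) :=
  [[(3, 2)], [(5, 3)], [], [(9, 2), (9, 3)]]

def Spec_get_all_settled (state : List (List (Int × Int))) (out : List (Int × Int)) : Prop := out = get_all_settled_alt state
instance (state : List (List (Int × Int))) (out : List (Int × Int)) : Decidable (Spec_get_all_settled state out) := by unfold Spec_get_all_settled; infer_instance

-- ===== CLAIM (what is proved, stated in full; the proofs are below) =====
def Claim_equal_get_all_settled : Prop := ∀ (state : List (List (Int × Int))), Dom_get_all_settled state → Pre_get_all_settled state → Spec_get_all_settled state (get_all_settled state)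

-- ===== LEMMAS AND PROOFS =====

-- sorting a two-space room by depth, reversed, puts the deeper space first
lemma sorted_room (c : Int) :
    PySem.List.sorted [(c, 2), (c, 3)] (fun s : Int × Int => s.2) true = [(c, 3), (c, 2)] := by
  apply PySem.List.sorted_rev_eq_of_perm_of_pairwise_gt
  · exact List.Perm.swap _ _ _
  · simp

-- the settled-position set of a room [(c,2),(c,3)], computed
lemma settledPositions_room (c : Int) (occ : PySem.Set (Int × Int)) :
    settledPositions [(c, 2), (c, 3)] occ =
      (if PySem.Set.contains occ (c, 3) then [(c, 3), (c, 2)] else [(c, 3)]) := by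
  simp only [settledPositions, sorted_room, List.foldl]
  by_cases h : PySem.Set.contains occ (c, 3) = true <;>
    simp [PySem.Set.add, PySem.Set.empty, PySem.Set.contains]

-- pointwise: A's is_settled equals membership in B's settled-position set
lemma settled_eq (state : List (List (Int × Int))) (t c : Int)
    (hroom : (PySem.List.pyGet? pvFinalState t).getD [] = [(c, 2), (c, 3)])
    (p : Int × Int) :
    is_settled p t state =
      PySem.Set.contains
        (settledPositions ((PySem.List.pyGet? pvFinalState t).getD [])
          (PySem.Set.ofList ((PySem.List.pyGet? state t).getD []))) p := by
  rw [hroom, settledPositions_room]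
  simp only [is_settled, is_foreigner_present, hroom]
  set ts := (PySem.List.pyGet? state t).getD [] with hts
  have hmem : PySem.Set.contains (PySem.Set.ofList ts) (c, 3) = ts.contains (c, 3) := by
    simp [PySem.Set.contains, PySem.Set.mem_ofList]
  by_cases h33 : ts.contains (c, 3) = true <;>
    by_cases hp2 : p = (c, 2) <;> by_cases hp3 : p = (c, 3) <;>
      simp_all [PySem.Set.contains, List.any]

-- per-team loop bodies agree as functions
lemma step_eq (state : List (List (Int × Int))) (t c : Int)
    (hroom : (PySem.List.pyGet? pvFinalState t).getD [] = [(c, 2), (c, 3)]) :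
    (fun (acc : List (Int × Int)) player =>
        if is_settled player t state then acc ++ [player] else acc) =
    (fun acc player =>
        if PySem.Set.contains
            (settledPositions ((PySem.List.pyGet? pvFinalState t).getD [])
              (PySem.Set.ofList ((PySem.List.pyGet? state t).getD []))) player
        then acc ++ [player] else acc) := by
  funext acc player
  rw [settled_eq state t c hroom]

-- ===== VERDICT (by name: the statement is the Claim_ definition above) =====
theorem get_all_settled_spec : Claim_equal_get_all_settled := by
  intro state _ _
  unfold Spec_get_all_settled get_all_settled get_all_settled_alt
  have h4 : PySem.List.pyRange 0 4 1 = [0, 1, 2, 3] := by decide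
  rw [h4]
  simp only [List.foldl]
  rw [step_eq state 0 3 (by decide), step_eq state 1 5 (by decide),
      step_eq state 2 7 (by decide), step_eq state 3 9 (by decide)]
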